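-- pv_equiv track=rewrite | github.com/romayengineer/marketface | play_dynamic.py | shorten_item_url
-- ===== SOURCE A (Python) =====
-- def shorten_item_url(url):
--     """
--     Turns the url to the following format
--     /marketplace/item/<number>
--     """
--     start = "/marketplace/item/"
--     if not url.startswith(start):
--         return url
--     i = len(start)
--     u = len(url)
--     if not u > i:
--         return url
--     str_numbers = [str(n) for n in range(10)]
--     while i < u:
--         if url[i] not in str_numbers:
--             break
--         i += 1
--     shortened = url[:i]
--     if shortened[-1] not in str_numbers:
--         raise Exception("marketplace item url does not have an id")
--     return shortened
-- ===== SOURCE B (Python) =====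
-- import re
--
-- def shorten_item_url(url):
--     """
--     Turns the url to the following format
--     /marketplace/item/<number>
--     (one anchored regex match instead of a manual digit-scanning loop)
--     """
--     start = "/marketplace/item/"
--     if not url.startswith(start):
--         return url
--     if not len(url) > len(start):
--         return url
--     m = re.match(re.escape(start) + "[0-9]+", url)
--     if m is None:
--         raise Exception("marketplace item url does not have an id")
--     return m.group(0)
-- ===== Notes on version B (the rewrite author's own statement) =====
-- stated objective: idiomatic
-- what changed: Replaces the manual index-walking while loop over a list of digit strings (plus the url[:i] slice and url[:i][-1] re-check) with a single anchored re.match of the escaped prefix followed by [0-9]+, returning the match.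
import Mathlib
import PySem

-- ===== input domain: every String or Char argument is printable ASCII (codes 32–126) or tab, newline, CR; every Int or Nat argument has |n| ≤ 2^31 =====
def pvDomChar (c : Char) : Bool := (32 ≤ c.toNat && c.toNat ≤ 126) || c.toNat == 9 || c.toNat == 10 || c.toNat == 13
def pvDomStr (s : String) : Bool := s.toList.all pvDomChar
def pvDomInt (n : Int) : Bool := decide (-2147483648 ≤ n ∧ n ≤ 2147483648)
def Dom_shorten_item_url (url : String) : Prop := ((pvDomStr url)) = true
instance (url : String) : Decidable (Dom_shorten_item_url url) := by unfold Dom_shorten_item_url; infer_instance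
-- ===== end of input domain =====

-- B replaces A's index-walking while loop (char-by-char digit scan + url[:i] slice + url[:i][-1]
-- re-check) by one anchored regex match (port: prefix + maximal ASCII digit run); objective: idiomatic.

-- ===== PORT A =====
-- the while loop: i advances while url[i] is one of "0".."9"; fuel = u - i bounds the iterations
def shortenLoopA (url : String) (nums : List String) : Nat → Int → Int
  | 0, i => i
  | fuel + 1, i =>
    match PySem.Str.pyGet? url i with
    | some c => if nums.contains (String.ofList [c]) then shortenLoopA url nums fuel (i + 1) else i
    | none => i

def shorten_item_url (url : String) : String :=
  let start := "/marketplace/item/"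
  if ¬ (PySem.Str.startswith url start) then url else
  let i : Int := PySem.Str.len start
  let u : Int := PySem.Str.len url
  if ¬ (u > i) then url else
  let str_numbers := (PySem.List.pyRange 0 10 1).map PySem.Int.toStr
  let i' := shortenLoopA url str_numbers (u - i).toNat i
  let shortened := PySem.Str.slice url none (some i')
  match PySem.Str.pyGet? shortened (-1) with
  | some c => if ¬ (str_numbers.contains (String.ofList [c])) then url else shortened
      -- 'then' branch: Python raises Exception("marketplace item url does not have an id"); excluded by Pre_
  | none => url  -- IndexError branch of shortened[-1]; unreachable (shortened is nonempty here)

-- ===== PORT B =====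
-- the regex character class [0-9]
def pvIsAsciiDigit (c : Char) : Bool := '0' ≤ c && c ≤ '9'

def shorten_item_url_alt (url : String) : String :=
  let start := "/marketplace/item/"
  if ¬ (PySem.Str.startswith url start) then url else
  if ¬ (PySem.Str.len url > PySem.Str.len start) then url else
  -- re.match(re.escape(start) + "[0-9]+", url): exact here — the escaped prefix is a literal that
  -- matches at position 0 (startswith holds), and greedy "[0-9]+" takes the maximal digit run;
  -- the match fails iff that run is empty
  let ds := (url.toList.drop 18).takeWhile pvIsAsciiDigit
  if ds.isEmpty then url  -- m is None: Python raises; excluded by Pre_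
  else String.ofList (url.toList.take 18 ++ ds)

-- ===== PRECONDITION & SPEC =====
-- Pre_ excludes exactly the inputs where A raises Exception (prefix present, longer than the
-- prefix, but the character right after the prefix is not an ASCII digit); B raises there too.
def Pre_shorten_item_url (url : String) : Prop :=
  PySem.Str.startswith url "/marketplace/item/" = true → 18 < url.toList.length →
    ('0' ≤ url.toList.getD 18 ' ' ∧ url.toList.getD 18 ' ' ≤ '9')
instance (url : String) : Decidable (Pre_shorten_item_url url) := by
  unfold Pre_shorten_item_url; infer_instance

def pvWitness_shorten_item_url : String := "/marketplace/item/123abc"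

def Spec_shorten_item_url (url : String) (out : String) : Prop := out = shorten_item_url_alt url
instance (url : String) (out : String) : Decidable (Spec_shorten_item_url url out) := by
  unfold Spec_shorten_item_url; infer_instance

-- ===== CLAIM (what is proved, stated in full; the proofs are below) =====
def Claim_equal_shorten_item_url : Prop := ∀ (url : String), Dom_shorten_item_url url →
  Pre_shorten_item_url url → Spec_shorten_item_url url (shorten_item_url url)

-- ===== LEMMAS AND PROOFS =====
theorem ofList_inj_iff (l l' : List Char) : String.ofList l = String.ofList l' ↔ l = l' :=
  ⟨fun h => String.ofList_injective h, fun h => by rw [h]⟩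

theorem mem_strnums (c : Char) :
    (((PySem.List.pyRange 0 10 1).map PySem.Int.toStr).contains (String.ofList [c]))
      = pvIsAsciiDigit c := by
  have h : (PySem.List.pyRange 0 10 1).map PySem.Int.toStr
      = ["0","1","2","3","4","5","6","7","8","9"] := by decide
  rw [h, pvIsAsciiDigit, Bool.eq_iff_iff]
  simp only [List.contains_cons, List.contains_nil, Bool.or_false, Bool.or_eq_true, beq_iff_eq,
    show ("0":String) = String.ofList ['0'] from rfl, show ("1":String) = String.ofList ['1'] from rfl,
    show ("2":String) = String.ofList ['2'] from rfl, show ("3":String) = String.ofList ['3'] from rfl,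
    show ("4":String) = String.ofList ['4'] from rfl, show ("5":String) = String.ofList ['5'] from rfl,
    show ("6":String) = String.ofList ['6'] from rfl, show ("7":String) = String.ofList ['7'] from rfl,
    show ("8":String) = String.ofList ['8'] from rfl, show ("9":String) = String.ofList ['9'] from rfl,
    ofList_inj_iff, List.cons.injEq, and_true, Bool.and_eq_true, decide_eq_true_eq,
    Char.le_def, Char.ext_iff, UInt32.ext_iff, UInt32.le_iff_toNat_le,
    show '0'.val.toNat = 48 from rfl, show '1'.val.toNat = 49 from rfl,
    show '2'.val.toNat = 50 from rfl, show '3'.val.toNat = 51 from rfl,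
    show '4'.val.toNat = 52 from rfl, show '5'.val.toNat = 53 from rfl,
    show '6'.val.toNat = 54 from rfl, show '7'.val.toNat = 55 from rfl,
    show '8'.val.toNat = 56 from rfl, show '9'.val.toNat = 57 from rfl]
  omega

-- A's while loop advances from k exactly over the maximal digit run of url[k:]
theorem loopA_eq (url : String) (fuel k : Nat) (hf : fuel = url.toList.length - k) :
    shortenLoopA url ((PySem.List.pyRange 0 10 1).map PySem.Int.toStr) fuel (k : Int)
      = (k : Int) + ((url.toList.drop k).takeWhile pvIsAsciiDigit).length := by
  induction fuel generalizing k with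
  | zero =>
    have hk : url.toList.length ≤ k := by omega
    rw [List.drop_eq_nil_of_le hk]
    simp [shortenLoopA]
  | succ fuel ih =>
    have hk : k < url.toList.length := by omega
    rw [shortenLoopA]
    rw [show ((k : Int)) = ((k : Nat) : Int) from rfl, PySem.Str.pyGet?_natCast,
      List.getElem?_eq_getElem hk]
    simp only [mem_strnums]
    rw [List.drop_eq_getElem_cons hk]
    by_cases hd : pvIsAsciiDigit url.toList[k] = true
    · rw [if_pos hd, List.takeWhile_cons_of_pos hd]
      have : ((k : Int) + 1) = ((k + 1 : Nat) : Int) := by push_cast; ring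
      rw [this, ih (k + 1) (by omega)]
      push_cast
      simp [List.length_cons]
      ring
    · rw [if_neg hd, List.takeWhile_cons_of_neg hd]
      simp

theorem take_takeWhile_len (p : Char → Bool) (l : List Char) :
    l.take (l.takeWhile p).length = l.takeWhile p := by
  induction l with
  | nil => simp
  | cons x xs ih =>
    by_cases h : p x = true
    · rw [List.takeWhile_cons_of_pos h]; simp [ih]
    · rw [List.takeWhile_cons_of_neg h]; simp

theorem shorten_item_url_eq (url : String) (h : Pre_shorten_item_url url) :
    shorten_item_url url = shorten_item_url_alt url := by
  unfold shorten_item_url shorten_item_url_alt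
  by_cases hsw : PySem.Str.startswith url "/marketplace/item/" = true
  swap
  · simp only [hsw]; simp
  by_cases hlen : 18 < url.toList.length
  swap
  · have : ¬ (PySem.Str.len url > PySem.Str.len "/marketplace/item/") := by
      rw [PySem.Str.len_eq, PySem.Str.len_eq]
      simp only [show ("/marketplace/item/" : String).toList.length = 18 from by decide]
      push_cast; omega
    simp only [hsw, this]; simp
  · -- main branch: both guards pass
    simp only [hsw, not_true, Bool.not_eq_true, if_false, PySem.Str.len_eq,
      show ("/marketplace/item/" : String).toList.length = 18 from by decide]
    have hgetD : url.toList.getD 18 ' ' = url.toList[18] := by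
      rw [List.getD_eq_getElem?_getD, List.getElem?_eq_getElem hlen]; rfl
    have hd0 : pvIsAsciiDigit url.toList[18] = true := by
      have h18 := h hsw hlen
      rw [hgetD] at h18
      simp [pvIsAsciiDigit, h18.1, h18.2]
    have hdrop : url.toList.drop 18 = url.toList[18] :: url.toList.drop 19 :=
      List.drop_eq_getElem_cons hlen
    have hne : (url.toList.drop 18).takeWhile pvIsAsciiDigit ≠ [] := by
      rw [hdrop, List.takeWhile_cons_of_pos hd0]; simp
    -- A's loop lands at 18 + (digit run).length
    have hc : ((url.toList.length : Int) > ((18 : Nat) : Int)) := by push_cast; omega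
    simp only [if_neg (not_not_intro hc)]
    have hloop : shortenLoopA url ((PySem.List.pyRange 0 10 1).map PySem.Int.toStr)
        (((url.toList.length : Int)) - ((18 : Nat) : Int)).toNat ((18 : Nat) : Int)
        = ((18 : Nat) : Int) + (((url.toList.drop 18).takeWhile pvIsAsciiDigit).length : Int) := by
      have hf : (((url.toList.length : Int)) - ((18 : Nat) : Int)).toNat
          = url.toList.length - 18 := by push_cast; omega
      rw [hf, loopA_eq url (url.toList.length - 18) 18 (by omega)]
    rw [hloop]
    -- url[:i] is take 18 ++ the digit run
    have hsplit : url.toList.take (18 + ((url.toList.drop 18).takeWhile pvIsAsciiDigit).length)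
        = url.toList.take 18 ++ (url.toList.drop 18).takeWhile pvIsAsciiDigit := by
      rw [List.take_add]
      congr 1
      exact take_takeWhile_len pvIsAsciiDigit (url.toList.drop 18)
    have hslice : PySem.Str.slice url none
        (some (((18 : Nat) : Int) + (((url.toList.drop 18).takeWhile pvIsAsciiDigit).length : Int)))
        = String.ofList (url.toList.take 18 ++ (url.toList.drop 18).takeWhile pvIsAsciiDigit) := by
      conv_lhs => rw [← String.ofList_toList (s := PySem.Str.slice url none
        (some (((18 : Nat) : Int) + (((url.toList.drop 18).takeWhile pvIsAsciiDigit).length : Int))))]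
      rw [PySem.Str.toList_slice, PySem.Chars.slice_eq_listSlice,
        show (some (((18 : Nat) : Int) + (((url.toList.drop 18).takeWhile pvIsAsciiDigit).length : Int)) : Option Int)
          = some (((18 + ((url.toList.drop 18).takeWhile pvIsAsciiDigit).length : Nat) : Int)) from by push_cast; rfl,
        PySem.List.slice_to_natCast, hsplit]
    rw [hslice]
    -- shortened[-1] is the last digit of the run, so A does not raise
    have hlast : ((url.toList.take 18 ++ (url.toList.drop 18).takeWhile pvIsAsciiDigit).getLast?)
        = some (((url.toList.drop 18).takeWhile pvIsAsciiDigit).getLast hne) := by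
      rw [List.getLast?_append, List.getLast?_eq_some_getLast (h := hne)]; rfl
    have hdig : pvIsAsciiDigit (((url.toList.drop 18).takeWhile pvIsAsciiDigit).getLast hne) = true :=
      List.mem_takeWhile_imp (List.getLast_mem hne)
    rw [show PySem.Str.pyGet?
          (String.ofList (url.toList.take 18 ++ (url.toList.drop 18).takeWhile pvIsAsciiDigit)) (-1)
        = some (((url.toList.drop 18).takeWhile pvIsAsciiDigit).getLast hne) from by
      rw [PySem.Str.pyGet?_eq]
      simp only [PySem.Chars.pyGet?_eq_listPyGet?, String.toList_ofList]
      rw [PySem.List.pyGet?_neg_one, hlast]]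
    simp only [mem_strnums, hdig]
    rw [if_neg (by decide), if_neg (by simpa [List.isEmpty_iff] using hne)]

-- ===== VERDICT (by name: the statement is the Claim_ definition above) =====
theorem shorten_item_url_spec : Claim_equal_shorten_item_url := by
  intro url _ hpre
  show shorten_item_url url = shorten_item_url_alt url
  exact shorten_item_url_eq url hpre
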